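-- pv_equiv track=rewrite | github.com/Pascal-Kueng/docx-md-comments | src/dmc/converter.py | text_to_pandoc_inlines
-- ===== SOURCE A (Python) =====
-- def text_to_pandoc_inlines(text: str):
--     if not text:
--         return []
--     out = []
--     i = 0
--     n = len(text)
--     while i < n:
--         ch = text[i]
--         if ch == "\n":
--             out.append({"t": "SoftBreak"})
--             i += 1
--             continue
--         if ch.isspace():
--             while i < n and text[i].isspace() and text[i] != "\n":
--                 i += 1
--             out.append({"t": "Space"})
--             continue
--         j = i
--         while j < n and (not text[j].isspace()) and text[j] != "\n":
--             j += 1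
--         out.append({"t": "Str", "c": text[i:j]})
--         i = j
--     return out
-- ===== SOURCE B (Python) =====
-- def text_to_pandoc_inlines(text: str):
--     out = []
--     buf = []
--     sp = False
--     for ch in text:
--         if ch == "\n":
--             if buf:
--                 out.append({"t": "Str", "c": "".join(buf)})
--                 buf = []
--             elif sp:
--                 out.append({"t": "Space"})
--             sp = False
--             out.append({"t": "SoftBreak"})
--         elif ch.isspace():
--             if buf:
--                 out.append({"t": "Str", "c": "".join(buf)})
--                 buf = []
--             sp = True
--         else:
--             if sp:
--                 out.append({"t": "Space"})
--                 sp = False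
--             buf.append(ch)
--     if buf:
--         out.append({"t": "Str", "c": "".join(buf)})
--     elif sp:
--         out.append({"t": "Space"})
--     return out
-- ===== Notes on version B (the rewrite author's own statement) =====
-- stated objective: alternative
-- what changed: Replaced the index-based while loop with nested rescanning inner loops and slicing by a single left-to-right fold over the characters that maintains a word buffer and a pending-space flag, flushing tokens as runs end.
import Mathlib
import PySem

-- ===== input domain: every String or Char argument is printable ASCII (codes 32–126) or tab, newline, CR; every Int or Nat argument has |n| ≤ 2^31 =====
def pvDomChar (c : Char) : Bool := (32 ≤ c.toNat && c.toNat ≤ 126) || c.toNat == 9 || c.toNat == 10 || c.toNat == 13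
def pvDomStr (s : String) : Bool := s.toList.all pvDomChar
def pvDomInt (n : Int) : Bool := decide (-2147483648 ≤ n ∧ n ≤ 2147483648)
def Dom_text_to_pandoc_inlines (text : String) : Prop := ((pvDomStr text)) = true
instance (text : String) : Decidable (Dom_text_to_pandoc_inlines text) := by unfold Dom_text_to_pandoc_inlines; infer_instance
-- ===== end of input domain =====

-- B replaces A's index/while scanner (inner rescanning loops + slices) with one fold keeping a
-- word buffer and a pending-space flag (objective: alternative decomposition, same cost).

-- token literals (dicts become association lists)
def pvSB : List (String × String) := [("t", "SoftBreak")]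
def pvSP : List (String × String) := [("t", "Space")]
def pvStr (cs : List Char) : List (String × String) := [("t", "Str"), ("c", String.ofList cs)]

-- ===== PORT A =====
-- inner-while conditions of A, verbatim
def pvASpace (c : Char) : Bool := PySem.Chars.isspace c && c != '\n'
def pvAWord (c : Char) : Bool := !PySem.Chars.isspace c && c != '\n'

-- A's outer while loop; position i is represented by the remaining suffix; the inner
-- while loops are the take/drop of the maximal run (text[i:j] is the taken run).
def pvALoop : List Char → List (List (String × String))
  | [] => []
  | ch :: rest =>
    if ch = '\n' then pvSB :: pvALoop rest
    else if PySem.Chars.isspace ch then pvSP :: pvALoop (rest.dropWhile pvASpace)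
    else pvStr (ch :: rest.takeWhile pvAWord) :: pvALoop (rest.dropWhile pvAWord)
termination_by l => l.length
decreasing_by
  · simp
  · exact Nat.lt_succ_of_le (List.length_dropWhile_le _ _)
  · exact Nat.lt_succ_of_le (List.length_dropWhile_le _ _)

def text_to_pandoc_inlines (text : String) : List (List (String × String)) :=
  if text = "" then [] else pvALoop text.toList

-- ===== PORT B =====
-- loop body of B: state = (out, buf, sp)
def pvBStep (s : List (List (String × String)) × List Char × Bool) (ch : Char) :
    List (List (String × String)) × List Char × Bool :=
  let (out, buf, sp) := s
  if ch = '\n' then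
    ((if buf ≠ [] then out ++ [pvStr buf] else if sp then out ++ [pvSP] else out) ++ [pvSB], [], false)
  else if PySem.Chars.isspace ch then
    ((if buf ≠ [] then out ++ [pvStr buf] else out), [], true)
  else
    ((if sp then out ++ [pvSP] else out), buf ++ [ch], false)

-- B's code after the loop
def pvBFinish (s : List (List (String × String)) × List Char × Bool) :
    List (List (String × String)) :=
  let (out, buf, sp) := s
  if buf ≠ [] then out ++ [pvStr buf] else if sp then out ++ [pvSP] else out

def text_to_pandoc_inlines_alt (text : String) : List (List (String × String)) :=
  pvBFinish (text.toList.foldl pvBStep ([], [], false))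

-- ===== PRECONDITION & SPEC =====
def Spec_text_to_pandoc_inlines (text : String) (out : List (List (String × String))) : Prop := out = text_to_pandoc_inlines_alt text
instance (text : String) (out : List (List (String × String))) : Decidable (Spec_text_to_pandoc_inlines text out) := by unfold Spec_text_to_pandoc_inlines; infer_instance

-- ===== CLAIM (what is proved, stated in full; the proofs are below) =====
def Claim_equal_text_to_pandoc_inlines : Prop := ∀ (text : String), Dom_text_to_pandoc_inlines text → Spec_text_to_pandoc_inlines text (text_to_pandoc_inlines text)

-- ===== LEMMAS AND PROOFS =====

lemma pvNewline_isspace : PySem.Chars.isspace '\n' = true := by decide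

lemma pvALoop_nil : pvALoop [] = [] := by rw [pvALoop]

lemma pvALoop_cons (c : Char) (t : List Char) :
    pvALoop (c :: t) =
      if c = '\n' then pvSB :: pvALoop t
      else if PySem.Chars.isspace c then pvSP :: pvALoop (t.dropWhile pvASpace)
      else pvStr (c :: t.takeWhile pvAWord) :: pvALoop (t.dropWhile pvAWord) := by
  rw [pvALoop]

-- Fold invariant, the three reachable state shapes at once:
-- buf=[] sp=false (neutral), buf=[] sp=true (a Space is pending), buf≠[] sp=false (a word is pending).
lemma pvMaster : ∀ l : List Char,
    (∀ out, pvBFinish (l.foldl pvBStep (out, [], false)) = out ++ pvALoop l) ∧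
    (∀ out, pvBFinish (l.foldl pvBStep (out, [], true)) =
      out ++ pvSP :: pvALoop (l.dropWhile pvASpace)) ∧
    (∀ out buf, buf ≠ [] → pvBFinish (l.foldl pvBStep (out, buf, false)) =
      out ++ pvStr (buf ++ l.takeWhile pvAWord) :: pvALoop (l.dropWhile pvAWord)) := by
  intro l
  induction l with
  | nil =>
    refine ⟨fun out => by simp [pvBFinish, pvALoop_nil], fun out => by simp [pvBFinish, pvALoop_nil],
      fun out buf hb => by simp [pvBFinish, pvALoop_nil, hb]⟩
  | cons c t ih =>
    obtain ⟨ih1, ih2, ih3⟩ := ih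
    by_cases hc : c = '\n'
    · subst hc
      refine ⟨fun out => ?_, fun out => ?_, fun out buf hb => ?_⟩
      · rw [List.foldl_cons]; simp only [pvBStep]; simp
        rw [ih1]
        simp [pvALoop_cons]
      · rw [List.foldl_cons]; simp only [pvBStep]; simp
        rw [ih1]
        simp [pvALoop_cons, pvASpace]
      · rw [List.foldl_cons]; simp only [pvBStep]; simp [hb]
        rw [ih1]
        simp [pvALoop_cons, pvAWord,
          pvNewline_isspace]
    · by_cases hs : PySem.Chars.isspace c = true
      · refine ⟨fun out => ?_, fun out => ?_, fun out buf hb => ?_⟩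
        · rw [List.foldl_cons]; simp only [pvBStep]; simp [hc, hs]
          rw [ih2]
          simp [pvALoop_cons, hc, hs]
        · rw [List.foldl_cons]; simp only [pvBStep]; simp [hc, hs]
          rw [ih2]
          simp [pvASpace, hs, hc]
        · rw [List.foldl_cons]; simp only [pvBStep]; simp [hc, hs, hb]
          rw [ih2]
          simp [pvALoop_cons, pvAWord, hs, hc, hb]
      · refine ⟨fun out => ?_, fun out => ?_, fun out buf hb => ?_⟩
        · rw [List.foldl_cons]; simp only [pvBStep]; simp [hc, hs]
          rw [ih3 _ _ (by simp)]
          simp [pvALoop_cons, hc, hs]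
        · rw [List.foldl_cons]; simp only [pvBStep]; simp [hc, hs]
          rw [ih3 _ _ (by simp)]
          simp [pvALoop_cons, pvASpace, hs, hc]
        · rw [List.foldl_cons]; simp only [pvBStep]; simp [hc, hs]
          rw [ih3 _ _ (by simp [hb])]
          simp [List.takeWhile_cons, pvAWord, hs, hc]

-- ===== VERDICT (by name: the statement is the Claim_ definition above) =====
theorem text_to_pandoc_inlines_spec : Claim_equal_text_to_pandoc_inlines := by
  intro text _
  unfold Spec_text_to_pandoc_inlines text_to_pandoc_inlines text_to_pandoc_inlines_alt
  by_cases h : text = ""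
  · subst h; simp [pvBFinish]
  · rw [if_neg h]
    have := (pvMaster text.toList).1 []
    simpa using this.symm
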